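-- pv_equiv track=rewrite | github.com/CarsonScott/Intelligent-Logical-Framing | src/Mapper.py | ordered_domains
-- ===== SOURCE A (Python) =====
-- def sort(X):
-- 	I = []
-- 	for i in range(len(X)):
-- 		I.append(i)
-- 	done = False
-- 	while not done:
-- 		done = True
-- 		for i in range(len(X)-1):
-- 			if X[i] > X[i+1]:
-- 				v = X[i]
-- 				X[i] = X[i+1]
-- 				X[i+1] = v
--
-- 				z = I[i]
-- 				I[i] = I[i+1]
-- 				I[i+1] = z
-- 				done = False
-- 	return I
--
-- def ordered_domains(validities, urgencies):
-- 	domains = []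
-- 	for i in range(len(validities)):
-- 		u = []
-- 		d = []
-- 		for j in range(len(validities[i])):
-- 			if validities[i][j]:
-- 				u.append(urgencies[j])
-- 				d.append(j)
--
-- 		order = sort(u)
-- 		domains.append([])
-- 		for j in order:
-- 			domains[i].append(d[j])
-- 	return domains
-- ===== SOURCE B (Python) =====
-- def ordered_domains(validities, urgencies):
--     domains = []
--     for row in validities:
--         d = [j for j in range(len(row)) if row[j]]
--         domains.append(sorted(d, key=lambda j: (urgencies[j], j)))
--     return domains
-- ===== Notes on version B (the rewrite author's own statement) =====
-- stated objective: simpler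
-- what changed: Replaced A's parallel urgency list, hand-written bubble sort returning a permutation array, and the separate permutation-application loop with a single collect of the valid indices followed by one library sort keyed by (urgency, index), which reproduces the bubble sort's stable tie order.
import Mathlib
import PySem

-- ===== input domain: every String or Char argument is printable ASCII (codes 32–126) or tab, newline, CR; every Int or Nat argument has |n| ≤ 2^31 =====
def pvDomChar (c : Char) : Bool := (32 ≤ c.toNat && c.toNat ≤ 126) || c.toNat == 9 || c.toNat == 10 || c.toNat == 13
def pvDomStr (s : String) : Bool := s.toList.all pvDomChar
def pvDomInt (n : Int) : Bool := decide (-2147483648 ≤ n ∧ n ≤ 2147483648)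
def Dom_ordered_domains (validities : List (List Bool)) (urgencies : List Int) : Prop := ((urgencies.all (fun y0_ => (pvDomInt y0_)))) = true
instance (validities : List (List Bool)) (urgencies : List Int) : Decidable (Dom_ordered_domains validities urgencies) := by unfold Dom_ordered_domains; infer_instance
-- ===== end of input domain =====

-- B replaces A's parallel urgency list, hand-written bubble sort with permutation array and
-- permutation-application loop by collecting the valid indices once and sorting them with the
-- library sort keyed by (urgency, index) — simpler: one collect-then-sort replaces three coordinated loops.
-- (A's local helper `sort` mutates its list argument in place, but only a list local to
-- ordered_domains; the arguments of ordered_domains are not mutated.)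


-- ===== PORT A =====

-- inversion count of X: termination measure for the `while not done` loop of A's `sort`
def invA : List Int → Nat
  | [] => 0
  | x :: xs => xs.countP (fun y => decide (y < x)) + invA xs

-- one pass of the inner `for i in range(len(X)-1)` loop of A's `sort`: walks the two parallel
-- lists, swapping adjacent out-of-order elements in both; returns (X, I, done)
def passA : List Int → List Int → List Int × List Int × Bool
  | x1 :: x2 :: xs, j1 :: j2 :: js =>
    if x2 < x1 then
      let r := passA (x1 :: xs) (j1 :: js)
      (x2 :: r.1, j2 :: r.2.1, false)
    else
      let r := passA (x2 :: xs) (j2 :: js)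
      (x1 :: r.1, j1 :: r.2.1, r.2.2)
  | X, I => (X, I, true)
termination_by X _ => X.length

-- the `while not done` loop of A's `sort`, acting on the parallel lists X and I.
-- Each pass that reports done=false strictly decreases the inversion count invA (proved below),
-- and the loop stops at the first pass reporting done=true, so invA X + 1 passes are exactly
-- enough fuel for Python's `while not done` loop (bubbleGo never reaches 0 fuel; proved below).
def bubbleGo : Nat → List Int → List Int → List Int × List Int
  | 0, X, I => (X, I)
  | fuel + 1, X, I =>
    let r := passA X I
    if r.2.2 then (r.1, r.2.1) else bubbleGo fuel r.1 r.2.1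

def bubbleA (X I : List Int) : List Int × List Int := bubbleGo (invA X + 1) X I

-- A's `sort(X)`: builds I = [0, 1, …, len(X)-1] by appending, bubbles X (and I alongside), returns I
def sortA (X : List Int) : List Int :=
  let I := (PySem.List.pyRange 0 (PySem.List.len X) 1).foldl (fun I i => I ++ [i]) []
  (bubbleA X I).2

def ordered_domains (validities : List (List Bool)) (urgencies : List Int) : List (List Int) :=
  (PySem.List.pyRange 0 (PySem.List.len validities) 1).foldl (fun domains i =>
    let row := PySem.List.pyGetD validities i []
    let ud := (PySem.List.pyRange 0 (PySem.List.len row) 1).foldl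
      (fun (ud : List Int × List Int) j =>
        if PySem.List.pyGetD row j false then
          (ud.1 ++ [PySem.List.pyGetD urgencies j 0], ud.2 ++ [j])
        else ud) ([], [])
    let order := sortA ud.1
    domains ++ [order.foldl (fun di j => di ++ [PySem.List.pyGetD ud.2 j 0]) []]) []

-- ===== PORT B =====

def ordered_domains_alt (validities : List (List Bool)) (urgencies : List Int) : List (List Int) :=
  validities.map (fun row =>
    let d := (PySem.List.pyRange 0 (PySem.List.len row) 1).filter
      (fun j => PySem.List.pyGetD row j false)
    PySem.List.sorted2 d (fun j => PySem.List.pyGetD urgencies j 0) (fun j => j) false)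

-- ===== PRECONDITION & SPEC =====
-- A (and B alike) raises IndexError on urgencies[j] when some valid index j of a row is
-- ≥ len(urgencies); Pre_ excludes exactly those inputs.
def Pre_ordered_domains (validities : List (List Bool)) (urgencies : List Int) : Prop :=
  ∀ row ∈ validities, ∀ j ∈ List.range row.length, row.getD j false = true → j < urgencies.length

instance (validities : List (List Bool)) (urgencies : List Int) : Decidable (Pre_ordered_domains validities urgencies) := by unfold Pre_ordered_domains; infer_instance

def pvWitness_ordered_domains : List (List Bool) × List Int := ([[true, false], [false, true], []], [5, 3])

def Spec_ordered_domains (validities : List (List Bool)) (urgencies : List Int) (out : List (List Int)) : Prop := out = ordered_domains_alt validities urgencies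
instance (validities : List (List Bool)) (urgencies : List Int) (out : List (List Int)) : Decidable (Spec_ordered_domains validities urgencies out) := by unfold Spec_ordered_domains; infer_instance

-- ===== CLAIM (what is proved, stated in full; the proofs are below) =====
def Claim_equal_ordered_domains : Prop := ∀ (validities : List (List Bool)) (urgencies : List Int), Dom_ordered_domains validities urgencies → Pre_ordered_domains validities urgencies → Spec_ordered_domains validities urgencies (ordered_domains validities urgencies)

-- ===== LEMMAS AND PROOFS =====

theorem passA_fst_perm (X I : List Int) : (passA X I).1.Perm X := by
  fun_induction passA with
  | case1 x1 x2 xs j1 j2 js h r ih =>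
    simp only [r] at ih ⊢
    exact (ih.cons x2).trans (List.Perm.swap x1 x2 xs)
  | case2 x1 x2 xs j1 j2 js h r ih =>
    simp only [r] at ih ⊢
    exact ih.cons x1
  | case3 X I h => exact List.Perm.refl X

theorem invA_passA_le (X I : List Int) : invA (passA X I).1 ≤ invA X := by
  fun_induction passA with
  | case1 x1 x2 xs j1 j2 js h r ih =>
    simp only [r] at ih ⊢
    have hc := (passA_fst_perm (x1 :: xs) (j1 :: js)).countP_eq (fun y => decide (y < x2))
    simp only [invA, hc, List.countP_cons]
    simp only [invA] at ih
    have h1 : (decide (x1 < x2) : Bool) = false := by simp; omega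
    have h2 : (decide (x2 < x1) : Bool) = true := by simpa using h
    simp [h1, h2] at ih ⊢
    omega
  | case2 x1 x2 xs j1 j2 js h r ih =>
    simp only [r] at ih ⊢
    have hc := (passA_fst_perm (x2 :: xs) (j2 :: js)).countP_eq (fun y => decide (y < x1))
    simp only [invA, hc] at ih ⊢
    omega
  | case3 X I h => exact le_refl _

theorem invA_passA_lt (X I : List Int) (h : (passA X I).2.2 = false) :
    invA (passA X I).1 < invA X := by
  fun_induction passA with
  | case1 x1 x2 xs j1 j2 js hlt r ih =>
    simp only [r] at ih ⊢
    have hle := invA_passA_le (x1 :: xs) (j1 :: js)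
    have hc := (passA_fst_perm (x1 :: xs) (j1 :: js)).countP_eq (fun y => decide (y < x2))
    simp only [invA, hc, List.countP_cons] at hle ⊢
    have h1 : (decide (x1 < x2) : Bool) = false := by simp; omega
    have h2 : (decide (x2 < x1) : Bool) = true := by simpa using hlt
    simp [h1, h2]
    omega
  | case2 x1 x2 xs j1 j2 js hlt r ih =>
    simp only [r] at ih ⊢
    replace ih := ih h
    have hc := (passA_fst_perm (x2 :: xs) (j2 :: js)).countP_eq (fun y => decide (y < x1))
    simp only [invA, hc] at ih ⊢
    omega
  | case3 X I hx => simp at h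

-- a bubble pass on the zipped (value, index) pairs; proof-side mirror of passA
def pairPass : List (Int × Int) → List (Int × Int) × Bool
  | p :: q :: rest =>
    if q.1 < p.1 then (q :: (pairPass (p :: rest)).1, false)
    else (p :: (pairPass (q :: rest)).1, (pairPass (q :: rest)).2)
  | l => (l, true)
termination_by l => l.length

theorem pairPass_perm (P : List (Int × Int)) : (pairPass P).1.Perm P := by
  fun_induction pairPass with
  | case1 p q rest h ih => exact (ih.cons q).trans (List.Perm.swap p q rest)
  | case2 p q rest h ih => exact ih.cons p
  | case3 l h => exact List.Perm.refl l

theorem pairPass_done_eq (P : List (Int × Int)) (h : (pairPass P).2 = true) :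
    (pairPass P).1 = P := by
  fun_induction pairPass with
  | case1 p q rest hlt ih => simp at h
  | case2 p q rest hlt ih => simp_all
  | case3 l hl => rfl

theorem pairPass_done_pairwise (P : List (Int × Int)) (h : (pairPass P).2 = true) :
    P.Pairwise (fun p q => p.1 ≤ q.1) := by
  fun_induction pairPass with
  | case1 p q rest hlt ih => simp at h
  | case2 p q rest hlt ih =>
    replace ih := ih h
    refine ih.cons ?_
    intro y hy
    rcases List.mem_cons.mp hy with rfl | hy'
    · exact le_of_not_gt hlt
    · exact le_trans (le_of_not_gt hlt) (List.rel_of_pairwise_cons ih hy')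
  | case3 l hl =>
    match l with
    | [] => exact List.Pairwise.nil
    | [p] => exact List.pairwise_singleton _ p
    | p :: q :: rest => simp at hl

theorem pairPass_filter (P : List (Int × Int)) (k : Int) :
    (pairPass P).1.filter (fun p => decide (p.1 = k)) = P.filter (fun p => decide (p.1 = k)) := by
  fun_induction pairPass with
  | case1 p q rest hlt ih =>
    have hne : p.1 ≠ q.1 := ne_of_gt hlt
    by_cases hp : p.1 = k <;> by_cases hq : q.1 = k <;>
      simp_all [List.filter_cons]
  | case2 p q rest hlt ih =>
    by_cases hp : p.1 = k <;> simp_all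
  | case3 l hl => rfl

theorem passA_zip (X I : List Int) :
    (passA X I).1.zip (passA X I).2.1 = (pairPass (X.zip I)).1 ∧
    (passA X I).2.2 = (pairPass (X.zip I)).2 := by
  fun_induction passA with
  | case1 x1 x2 xs j1 j2 js hlt r ih =>
    simp only [r] at ih ⊢
    have hz : (x1 :: x2 :: xs).zip (j1 :: j2 :: js) = (x1, j1) :: (x2, j2) :: xs.zip js := rfl
    rw [hz]
    have hc : ((x2, j2) : Int × Int).1 < ((x1, j1) : Int × Int).1 := hlt
    constructor
    · show (x2, j2) :: ((passA (x1 :: xs) (j1 :: js)).1.zip (passA (x1 :: xs) (j1 :: js)).2.1) = _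
      rw [ih.1]
      simp [pairPass, hc]
    · simp [pairPass, hc]
  | case2 x1 x2 xs j1 j2 js hlt r ih =>
    simp only [r] at ih ⊢
    have hz : (x1 :: x2 :: xs).zip (j1 :: j2 :: js) = (x1, j1) :: (x2, j2) :: xs.zip js := rfl
    rw [hz]
    have hc : ¬ ((x2, j2) : Int × Int).1 < ((x1, j1) : Int × Int).1 := hlt
    constructor
    · show (x1, j1) :: ((passA (x2 :: xs) (j2 :: js)).1.zip (passA (x2 :: xs) (j2 :: js)).2.1) = _
      rw [ih.1]
      simp [pairPass, hc]
    · rw [ih.2]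
      simp [pairPass, hc]
  | case3 X I h =>
    rcases X with _ | ⟨x1, _ | ⟨x2, xs⟩⟩ <;> rcases I with _ | ⟨j1, _ | ⟨j2, js⟩⟩ <;>
      first
        | exact (h _ _ _ _ _ _ rfl rfl).elim
        | simp [pairPass]

theorem passA_snd_len (X I : List Int) : (passA X I).2.1.length = I.length := by
  fun_induction passA with
  | case1 x1 x2 xs j1 j2 js hlt r ih => simp only [r] at ih ⊢; simp [ih]
  | case2 x1 x2 xs j1 j2 js hlt r ih => simp only [r] at ih ⊢; simp [ih]
  | case3 X I h => rfl

theorem bubbleGo_facts (fuel : Nat) : ∀ X I : List Int, invA X < fuel →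
    ((bubbleGo fuel X I).1.zip (bubbleGo fuel X I).2).Perm (X.zip I) ∧
    ((bubbleGo fuel X I).1.zip (bubbleGo fuel X I).2).Pairwise (fun p q => p.1 ≤ q.1) ∧
    ∀ k, ((bubbleGo fuel X I).1.zip (bubbleGo fuel X I).2).filter (fun p => decide (p.1 = k)) =
      (X.zip I).filter (fun p => decide (p.1 = k)) := by
  induction fuel with
  | zero => intro X I h; exact absurd h (Nat.not_lt_zero _)
  | succ fuel ih =>
    intro X I hf
    have hz := passA_zip X I
    by_cases h : (passA X I).2.2 = true
    · have hdone : (pairPass (X.zip I)).2 = true := by rw [← hz.2]; exact h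
      have heq : (passA X I).1.zip (passA X I).2.1 = X.zip I := by
        rw [hz.1, pairPass_done_eq _ hdone]
      simp only [bubbleGo, h, if_true]
      rw [heq]
      exact ⟨List.Perm.refl _, pairPass_done_pairwise _ hdone, fun k => rfl⟩
    · have h' : (passA X I).2.2 = false := by simpa using h
      have hlt : invA (passA X I).1 < fuel := by
        have := invA_passA_lt X I h'
        omega
      obtain ⟨ihp, ihw, ihf2⟩ := ih (passA X I).1 (passA X I).2.1 hlt
      simp only [bubbleGo, h', if_false, Bool.false_eq_true]
      refine ⟨ihp.trans ?_, ihw, fun k => (ihf2 k).trans ?_⟩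
      · rw [hz.1]; exact pairPass_perm (X.zip I)
      · rw [hz.1]; exact pairPass_filter (X.zip I) k

theorem bubbleA_facts (X I : List Int) :
    ((bubbleA X I).1.zip (bubbleA X I).2).Perm (X.zip I) ∧
    ((bubbleA X I).1.zip (bubbleA X I).2).Pairwise (fun p q => p.1 ≤ q.1) ∧
    ∀ k, ((bubbleA X I).1.zip (bubbleA X I).2).filter (fun p => decide (p.1 = k)) =
      (X.zip I).filter (fun p => decide (p.1 = k)) :=
  bubbleGo_facts (invA X + 1) X I (Nat.lt_succ_self _)

theorem bubbleGo_len (fuel : Nat) : ∀ X I : List Int, invA X < fuel → X.length = I.length →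
    (bubbleGo fuel X I).1.length = X.length ∧ (bubbleGo fuel X I).2.length = I.length := by
  induction fuel with
  | zero => intro X I h; exact absurd h (Nat.not_lt_zero _)
  | succ fuel ih =>
    intro X I hf hlen
    by_cases h : (passA X I).2.2 = true
    · simp only [bubbleGo, h, if_true]
      exact ⟨(passA_fst_perm X I).length_eq, passA_snd_len X I⟩
    · have h' : (passA X I).2.2 = false := by simpa using h
      have hlt : invA (passA X I).1 < fuel := by
        have := invA_passA_lt X I h'
        omega
      have hfl : (passA X I).1.length = X.length := (passA_fst_perm X I).length_eq
      have hsl : (passA X I).2.1.length = I.length := passA_snd_len X I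
      obtain ⟨ih1, ih2⟩ := ih (passA X I).1 (passA X I).2.1 hlt (by omega)
      simp only [bubbleGo, h', if_false, Bool.false_eq_true]
      omega

theorem bubbleA_len (X I : List Int) :
    X.length = I.length → (bubbleA X I).1.length = X.length ∧ (bubbleA X I).2.length = I.length :=
  bubbleGo_len (invA X + 1) X I (Nat.lt_succ_self _)

theorem pairwise_snd_of_filters (l : List (Int × Int))
    (h : ∀ k, (l.filter (fun p => decide (p.1 = k))).Pairwise (fun p q => p.2 < q.2)) :
    l.Pairwise (fun p q => p.1 = q.1 → p.2 < q.2) := by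
  induction l with
  | nil => exact List.Pairwise.nil
  | cons a t ih =>
    refine List.Pairwise.cons ?_ (ih ?_)
    · intro b hb hab
      have hf : (a :: t.filter (fun p => decide (p.1 = a.1))).Pairwise
          (fun p q => p.2 < q.2) := by simpa [List.filter_cons] using h a.1
      exact List.rel_of_pairwise_cons hf (List.mem_filter.mpr ⟨hb, by simp [hab.symm]⟩)
    · intro k
      by_cases hak : a.1 = k
      · have hf : (a :: t.filter (fun p => decide (p.1 = k))).Pairwise
            (fun p q => p.2 < q.2) := by simpa [List.filter_cons, hak] using h k
        exact hf.of_cons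
      · simpa [List.filter_cons, hak] using h k

theorem sorted2_eq_sorted_lex (xs : List Int) (k1 : Int → Int) :
    PySem.List.sorted2 xs k1 (fun j => j) false =
    PySem.List.sorted xs (fun j => toLex (k1 j, j)) false := by
  simp only [PySem.List.sorted2, PySem.List.sorted]
  have hfun : (fun (a b : Int) => decide (k1 a < k1 b) || (!decide (k1 b < k1 a) && decide (a < b)))
      = fun a b => decide (toLex (k1 a, a) < toLex (k1 b, b)) := by
    funext a b
    rcases lt_trichotomy (k1 a) (k1 b) with hlt | heq | hgt
    · simp [Prod.Lex.toLex_lt_toLex, hlt]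
    · simp [Prod.Lex.toLex_lt_toLex, heq]
    · simp [Prod.Lex.toLex_lt_toLex, hgt, hgt.not_gt, hgt.ne']
  simp only [Bool.false_eq_true, if_false, hfun]

theorem row_eq (f : Int → Int) (d : List Int) (hd : d.Pairwise (· < ·)) :
    (sortA (d.map f)).map (fun j => PySem.List.pyGetD d j 0) =
    PySem.List.sorted2 d f (fun j => j) false := by
  set u := d.map f with hu
  have hlen : u.length = d.length := by simp [hu]
  have hsortA : sortA u = (bubbleA u (PySem.List.pyRange 0 (PySem.List.len u) 1)).2 := by
    simp only [sortA]
    rw [PySem.List.foldl_append_singleton, List.nil_append]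
  set I0 := PySem.List.pyRange 0 (PySem.List.len u) 1 with hI0
  have hlenI0 : I0.length = u.length := by
    rw [hI0]; simp [PySem.List.length_pyRange_one, PySem.List.len_eq]
  obtain ⟨hperm, hpw, hfil⟩ := bubbleA_facts u I0
  obtain ⟨hL1, hL2⟩ := bubbleA_len u I0 (by omega)
  set Z := (bubbleA u I0).1.zip (bubbleA u I0).2 with hZ
  have hsnd : Z.map Prod.snd = (bubbleA u I0).2 := List.map_snd_zip (by omega)
  have hP0snd : (u.zip I0).map Prod.snd = I0 := List.map_snd_zip (by omega)
  have hLHS : (sortA u).map (fun j => PySem.List.pyGetD d j 0)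
      = Z.map (fun p => PySem.List.pyGetD d p.2 0) := by
    rw [hsortA, ← hsnd, List.map_map]
    rfl
  have hP0map : (u.zip I0).map (fun p => PySem.List.pyGetD d p.2 0) = d := by
    rw [show (fun p : Int × Int => PySem.List.pyGetD d p.2 0)
        = (fun j => PySem.List.pyGetD d j 0) ∘ Prod.snd from rfl, ← List.map_map, hP0snd, hI0]
    have hcast : PySem.List.len u = ((d.length : Nat) : Int) := by
      rw [PySem.List.len_eq, hlen]
    rw [hcast]
    exact PySem.List.map_pyGetD_pyRange_zero' d 0
  have hRperm : (Z.map (fun p => PySem.List.pyGetD d p.2 0)).Perm d := by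
    have := hperm.map (fun p : Int × Int => PySem.List.pyGetD d p.2 0)
    rwa [hP0map] at this
  have hmem : ∀ p ∈ u.zip I0, ∃ t : ℕ, t < d.length ∧ p.2 = (t : Int) ∧
      p.1 = f (d.getD t 0) ∧ PySem.List.pyGetD d p.2 0 = d.getD t 0 := by
    intro p hp
    obtain ⟨t, ht, hgt⟩ := List.mem_iff_getElem.mp hp
    have ht' : t < (u.zip I0).length := ht
    have htu : t < u.length := by
      rw [List.length_zip] at ht'; omega
    have htd : t < d.length := by omega
    have ht1 : t < I0.length := by omega
    have ht2 : t < (PySem.List.pyRange 0 (PySem.List.len u) 1).length := by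
      rw [← hI0]; omega
    have hI0t : I0[t] = (t : Int) := by
      rw [List.getElem_of_eq hI0 ht1, PySem.List.getElem_pyRange_one 0 (PySem.List.len u) t ht2]
      ring
    have hut : u[t] = f (d.getD t 0) := by
      rw [List.getD_eq_getElem d 0 htd]
      simp [hu]
    refine ⟨t, htd, ?_, ?_, ?_⟩
    · rw [← hgt, List.getElem_zip, hI0t]
    · rw [← hgt, List.getElem_zip, hut]
    · rw [← hgt, List.getElem_zip]
      show PySem.List.pyGetD d I0[t] 0 = d.getD t 0
      rw [hI0t, PySem.List.pyGetD_natCast]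
  have hZsub : ∀ p ∈ Z, p ∈ u.zip I0 := fun p hp => hperm.subset hp
  have hP0pw2 : (u.zip I0).Pairwise (fun p q => p.2 < q.2) := by
    have hpr : I0.Pairwise (· < ·) := by
      rw [hI0]; exact PySem.List.pairwise_lt_pyRange_one 0 (PySem.List.len u)
    have h' : ((u.zip I0).map Prod.snd).Pairwise (· < ·) := by rwa [hP0snd]
    exact List.pairwise_map.mp h'
  have hZpw2 : Z.Pairwise (fun p q => p.1 = q.1 → p.2 < q.2) := by
    refine pairwise_snd_of_filters Z (fun k => ?_)
    rw [hfil k]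
    exact List.Pairwise.sublist List.filter_sublist hP0pw2
  have hcomb := hpw.and hZpw2
  have hRpw : (Z.map (fun p => PySem.List.pyGetD d p.2 0)).Pairwise
      (fun a b => toLex (f a, a) < toLex (f b, b)) := by
    refine List.pairwise_map.mpr ?_
    refine hcomb.imp_of_mem ?_
    intro p q hp hq hpq
    obtain ⟨s, hs, hps, hp1, hpe⟩ := hmem p (hZsub p hp)
    obtain ⟨t, ht, hqs, hq1, hqe⟩ := hmem q (hZsub q hq)
    rw [hpe, hqe, Prod.Lex.toLex_lt_toLex]
    rcases lt_or_eq_of_le hpq.1 with hlt | heq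
    · left
      rw [← hp1, ← hq1]
      exact hlt
    · right
      have hst : p.2 < q.2 := hpq.2 heq
      have hst' : s < t := by
        rw [hps, hqs] at hst; exact_mod_cast hst
      have hdlt : d.getD s 0 < d.getD t 0 := by
        rw [List.getD_eq_getElem d 0 hs, List.getD_eq_getElem d 0 ht]
        exact List.pairwise_iff_getElem.mp hd s t hs ht hst'
      exact ⟨by rw [← hp1, ← hq1]; exact heq, hdlt⟩
  rw [hLHS, sorted2_eq_sorted_lex]
  exact (PySem.List.sorted_eq_of_perm_of_pairwise_lt d _ _ hRperm hRpw).symm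

theorem buildUD (c : Int → Bool) (f : Int → Int) (L : List Int) (a b : List Int) :
    L.foldl (fun ud j => if c j then (ud.1 ++ [f j], ud.2 ++ [j]) else ud) (a, b)
      = (a ++ (L.filter c).map f, b ++ L.filter c) := by
  induction L generalizing a b with
  | nil => simp
  | cons x t ih => by_cases hc : c x <;> simp [hc, ih]

-- the per-row computation of A, as a function of the row
def ROWA (urg : List Int) (row : List Bool) : List Int :=
  let ud := (PySem.List.pyRange 0 (PySem.List.len row) 1).foldl
    (fun (ud : List Int × List Int) j =>
      if PySem.List.pyGetD row j false then
        (ud.1 ++ [PySem.List.pyGetD urg j 0], ud.2 ++ [j])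
      else ud) ([], [])
  (sortA ud.1).foldl (fun di j => di ++ [PySem.List.pyGetD ud.2 j 0]) []

-- the per-row computation of B, as a function of the row
def ROWB (urg : List Int) (row : List Bool) : List Int :=
  PySem.List.sorted2
    ((PySem.List.pyRange 0 (PySem.List.len row) 1).filter (fun j => PySem.List.pyGetD row j false))
    (fun j => PySem.List.pyGetD urg j 0) (fun j => j) false

theorem ROW_eq (urg : List Int) (row : List Bool) : ROWA urg row = ROWB urg row := by
  unfold ROWA ROWB
  rw [buildUD]
  set d := (PySem.List.pyRange 0 (PySem.List.len row) 1).filter (fun j => PySem.List.pyGetD row j false) with hdd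
  have hd : d.Pairwise (· < ·) :=
    List.Pairwise.sublist List.filter_sublist (PySem.List.pairwise_lt_pyRange_one 0 (PySem.List.len row))
  have h1 : ([] : List Int) ++ d.map (fun j => PySem.List.pyGetD urg j 0) = d.map (fun j => PySem.List.pyGetD urg j 0) := List.nil_append _
  have h2 : ([] : List Int) ++ d = d := List.nil_append _
  simp only [List.nil_append]
  rw [PySem.List.foldl_append_singleton_eq_map]
  simpa using row_eq (fun j => PySem.List.pyGetD urg j 0) d hd

theorem ordered_domains_main (validities : List (List Bool)) (urgencies : List Int) :
    ordered_domains validities urgencies = ordered_domains_alt validities urgencies := by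
  have hA : ordered_domains validities urgencies = validities.map (ROWA urgencies) := by
    calc ordered_domains validities urgencies
        = (PySem.List.pyRange 0 (PySem.List.len validities) 1).foldl
            (fun acc i => (fun acc row => acc ++ [ROWA urgencies row]) acc
              (PySem.List.pyGetD validities i [])) [] := rfl
      _ = validities.foldl (fun acc row => acc ++ [ROWA urgencies row]) [] :=
          PySem.List.foldl_pyRange_zero_pyGetD validities []
            (fun acc row => acc ++ [ROWA urgencies row]) []
      _ = [] ++ validities.map (ROWA urgencies) :=
          PySem.List.foldl_append_singleton_eq_map _ validities []
      _ = validities.map (ROWA urgencies) := List.nil_append _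
  have hB : ordered_domains_alt validities urgencies = validities.map (ROWB urgencies) := rfl
  rw [hA, hB]
  exact List.map_congr_left (fun row _ => ROW_eq urgencies row)

-- ===== VERDICT (by name: the statement is the Claim_ definition above) =====
theorem ordered_domains_spec : Claim_equal_ordered_domains := by
  intro validities urgencies _ _
  unfold Spec_ordered_domains
  exact ordered_domains_main validities urgencies
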